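-- pv_equiv track=rewrite | github.com/Javilejoo/Lexical-Analyzer-Generator | estructuras.py | tokenize_postfix
-- ===== SOURCE A (Python) =====
-- def tokenize_postfix(postfix_expr):
--     """
--     Tokeniza la expresión postfix de modo que:
--       - Los literales entre comillas (ej: "'+'", "'*'", "'('", "')'") se agrupan como un único token.
--       - Se agrupan secuencias de escape (por ejemplo, "\n", "\t").
--       - El resto se tokeniza carácter a carácter, sin ignorar espacios, tabulaciones ni saltos de línea.
--     """
--     tokens = []
--     i = 0
--     while i < len(postfix_expr):
--         if postfix_expr[i] == "'":
--             # Se encontró el inicio de un literal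
--             j = i + 1
--             literal = ""
--             while j < len(postfix_expr) and postfix_expr[j] != "'":
--                 literal += postfix_expr[j]
--                 j += 1
--             if j < len(postfix_expr):
--                 # Agregar el token literal completo (con comillas)
--                 tokens.append("'" + literal + "'")
--                 i = j + 1
--             else:
--                 # En caso de comilla sin cerrar, se agrega tal cual
--                 tokens.append("'" + literal)
--                 i = j
--         elif postfix_expr[i] == '\\' and (i + 1) < len(postfix_expr):
--             # Agrupar secuencia de escape (por ejemplo, "\n" o "\t")
--             tokens.append(postfix_expr[i] + postfix_expr[i+1])
--             i += 2
--         else: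
--             # Agregar cualquier carácter, incluidos espacios, tabulaciones y saltos
--             tokens.append(postfix_expr[i])
--             i += 1
--     return tokens
-- ===== SOURCE B (Python) =====
-- import re
--
-- _TOKEN_RE = re.compile(r"'[^']*'|'[^']*|\\[\s\S]|[\s\S]")
--
-- def tokenize_postfix(postfix_expr):
--     return _TOKEN_RE.findall(postfix_expr)
-- ===== Notes on version B (the rewrite author's own statement) =====
-- stated objective: idiomatic
-- what changed: Replaced the hand-written index-scanning while-loop (with an inner quote-collecting loop) by a single precompiled regex: re.findall with the ordered alternation closed-literal | unclosed-literal | backslash-escape | any-char.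
import Mathlib
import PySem

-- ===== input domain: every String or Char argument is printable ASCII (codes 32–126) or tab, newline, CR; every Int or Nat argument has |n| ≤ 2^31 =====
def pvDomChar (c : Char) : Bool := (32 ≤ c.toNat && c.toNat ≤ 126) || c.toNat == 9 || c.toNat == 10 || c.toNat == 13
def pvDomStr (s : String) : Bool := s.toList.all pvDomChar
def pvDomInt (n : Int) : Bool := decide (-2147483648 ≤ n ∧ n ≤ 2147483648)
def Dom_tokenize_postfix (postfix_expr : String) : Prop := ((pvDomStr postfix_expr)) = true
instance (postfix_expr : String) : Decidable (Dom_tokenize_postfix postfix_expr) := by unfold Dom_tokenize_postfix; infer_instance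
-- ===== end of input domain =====

-- B replaces A's manual index-scanning while-loop by a single regex findall (objective: idiomatic).

-- ===== PORT A =====
-- inner while loop: collects the literal between quotes, returns (literal, j)
def tokAInner (cs : List Char) (j : Nat) (lit : List Char) : List Char × Nat :=
  if h : j < cs.length then
    if cs[j] = '\'' then (lit, j)
    else tokAInner cs (j + 1) (lit ++ [cs[j]])
  else (lit, j)
termination_by cs.length - j
decreasing_by exact Nat.sub_succ_lt_self cs.length j h

-- the two lemmas the outer loop's termination proof cites
theorem tokAInner_snd_ge (cs : List Char) (j : Nat) (lit : List Char) :
    j ≤ (tokAInner cs j lit).2 := by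
  induction j, lit using tokAInner.induct cs with
  | case1 j lit hlt hq => rw [tokAInner, dif_pos hlt, if_pos hq]
  | case2 j lit hlt hq ih =>
    rw [tokAInner, dif_pos hlt, if_neg hq]
    exact Nat.le_of_succ_le ih
  | case3 j lit hge => rw [tokAInner, dif_neg hge]

theorem tokALoop_dec (cs : List Char) (i : Nat) (h : i < cs.length) :
    cs.length - (tokAInner cs (i + 1) []).2 < cs.length - i :=
  Nat.sub_lt_sub_left h (Nat.lt_of_lt_of_le (Nat.lt_succ_self i) (tokAInner_snd_ge cs (i + 1) []))

-- outer while loop of A, on the index i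
def tokALoop (cs : List Char) (i : Nat) : List String :=
  if h : i < cs.length then
    if cs[i] = '\'' then
      let r := tokAInner cs (i + 1) []
      if r.2 < cs.length then
        String.ofList ('\'' :: (r.1 ++ ['\''])) :: tokALoop cs (r.2 + 1)
      else
        String.ofList ('\'' :: r.1) :: tokALoop cs r.2
    else if hb : cs[i] = '\\' ∧ i + 1 < cs.length then
      String.ofList [cs[i], cs[i+1]] :: tokALoop cs (i + 2)
    else
      String.ofList [cs[i]] :: tokALoop cs (i + 1)
  else []
termination_by cs.length - i
decreasing_by
  · exact Nat.lt_of_le_of_lt (Nat.sub_le_sub_left (Nat.le_succ _) _) (tokALoop_dec cs i h)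
  · exact tokALoop_dec cs i h
  · exact Nat.sub_lt_sub_left h (Nat.lt_of_lt_of_le (Nat.lt_succ_self i) (Nat.le_succ _))
  · exact Nat.sub_succ_lt_self cs.length i h

def tokenize_postfix (postfix_expr : String) : List String :=
  tokALoop postfix_expr.toList 0

-- ===== PORT B =====
-- the lemma tokBLoop's termination proof cites
theorem tokBLoop_dec (rest : List Char) :
    ((rest.dropWhile (fun x => x ≠ '\'')).tail).length < rest.length + 1 :=
  Nat.lt_succ_of_le (Nat.le_trans (Nat.le_trans (Nat.le_of_eq List.length_tail)
    (Nat.sub_le _ _)) (List.length_dropWhile_le _ _))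

-- Hand port of re.findall(r"'[^']*'|'[^']*|\\[\s\S]|[\s\S]", s): at each position the
-- leftmost alternative that matches wins, and findall resumes after the match — exact,
-- since the alternatives are: closed quoted literal, unclosed quote-to-end literal,
-- backslash + any one char, any one char.
def tokBLoop (cs : List Char) : List String :=
  match cs with
  | [] => []
  | c :: rest =>
    if c = '\'' then
      -- '[^']*'  : quote, a run of non-quotes, a closing quote — else '[^']* to the end
      let lit := rest.takeWhile (fun x => x ≠ '\'')
      let d := rest.dropWhile (fun x => x ≠ '\'')
      if d.isEmpty then [String.ofList ('\'' :: lit)]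
      else String.ofList ('\'' :: (lit ++ ['\''])) :: tokBLoop d.tail
    else if c = '\\' then
      -- \\[\s\S] : backslash plus one char; a lone final backslash falls to [\s\S]
      match rest with
      | c2 :: rest2 => String.ofList [c, c2] :: tokBLoop rest2
      | [] => [String.ofList [c]]
    else
      String.ofList [c] :: tokBLoop rest
termination_by cs.length
decreasing_by
  · exact tokBLoop_dec rest
  · exact Nat.lt_succ_of_le (Nat.le_succ _)
  · exact Nat.lt_succ_self _

def tokenize_postfix_alt (postfix_expr : String) : List String :=
  tokBLoop postfix_expr.toList

-- ===== PRECONDITION & SPEC =====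
def Spec_tokenize_postfix (postfix_expr : String) (out : List String) : Prop := out = tokenize_postfix_alt postfix_expr
instance (postfix_expr : String) (out : List String) : Decidable (Spec_tokenize_postfix postfix_expr out) := by unfold Spec_tokenize_postfix; infer_instance

-- ===== CLAIM (what is proved, stated in full; the proofs are below) =====
def Claim_equal_tokenize_postfix : Prop := ∀ (postfix_expr : String), Dom_tokenize_postfix postfix_expr → Spec_tokenize_postfix postfix_expr (tokenize_postfix postfix_expr)

-- ===== LEMMAS AND PROOFS =====

theorem drop_len_takeWhile (p : Char → Bool) : ∀ l : List Char,
    l.drop (l.takeWhile p).length = l.dropWhile p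
  | [] => rfl
  | a :: l => by
    by_cases h : p a <;>
      simp [h, drop_len_takeWhile p l]

theorem tokAInner_spec (cs : List Char) (j : Nat) (lit : List Char) :
    tokAInner cs j lit =
      (lit ++ (cs.drop j).takeWhile (fun x => x ≠ '\''),
       j + ((cs.drop j).takeWhile (fun x => x ≠ '\'')).length) := by
  induction j, lit using tokAInner.induct cs with
  | case1 j lit hlt hq =>
    rw [tokAInner, dif_pos hlt, if_pos hq, List.drop_eq_getElem_cons hlt, List.takeWhile_cons]
    simp [hq]
  | case2 j lit hlt hq ih =>
    rw [tokAInner, dif_pos hlt, if_neg hq, ih, List.drop_eq_getElem_cons hlt, List.takeWhile_cons]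
    simp [hq, Prod.ext_iff]
    omega
  | case3 j lit hge =>
    rw [tokAInner, dif_neg hge, List.drop_eq_nil_of_le (by omega)]
    simp

theorem tokALoop_eq (n : Nat) (cs : List Char) (i : Nat) (hn : cs.length - i ≤ n) :
    tokALoop cs i = tokBLoop (cs.drop i) := by
  induction n generalizing i with
  | zero =>
    rw [tokALoop, dif_neg (by omega), List.drop_eq_nil_of_le (by omega), tokBLoop]
  | succ n ih =>
    by_cases h : i < cs.length
    · have hdrop : cs.drop i = cs[i] :: cs.drop (i + 1) := List.drop_eq_getElem_cons h
      by_cases hq : cs[i] = '\''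
      · -- quote case
        rw [tokALoop, dif_pos h, if_pos hq, tokAInner_spec]
        rw [hdrop, tokBLoop.eq_def]
        simp only [if_pos hq, List.nil_append]
        have htd := List.takeWhile_append_dropWhile
          (p := fun x => decide (x ≠ '\'')) (l := cs.drop (i + 1))
        have hlenr : (cs.drop (i + 1)).length = cs.length - (i + 1) := by simp
        cases hd : (cs.drop (i + 1)).dropWhile (fun x => x ≠ '\'') with
        | cons c tail =>
          rw [hd] at htd
          have hlen2 : ((cs.drop (i + 1)).takeWhile (fun x => x ≠ '\'')).length
              + (tail.length + 1) = cs.length - (i + 1) := by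
            have := congrArg List.length htd
            simp only [List.length_append, List.length_cons] at this
            omega
          have hjlt : i + 1 + ((cs.drop (i + 1)).takeWhile (fun x => x ≠ '\'')).length
              < cs.length := by omega
          rw [if_pos hjlt]
          have hdropj : cs.drop (i + 1 + ((cs.drop (i + 1)).takeWhile (fun x => x ≠ '\'')).length)
              = c :: tail := by
            have h1 : cs.drop (i + 1 + ((cs.drop (i + 1)).takeWhile (fun x => x ≠ '\'')).length)
                = (cs.drop (i + 1)).drop ((cs.drop (i + 1)).takeWhile (fun x => x ≠ '\'')).length := by
              rw [List.drop_drop]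
            rw [h1, drop_len_takeWhile, hd]
          have htail : cs.drop (i + 1 + ((cs.drop (i + 1)).takeWhile (fun x => x ≠ '\'')).length + 1)
              = tail := by
            have h1 : cs.drop (i + 1 + ((cs.drop (i + 1)).takeWhile (fun x => x ≠ '\'')).length + 1)
                = (cs.drop (i + 1 + ((cs.drop (i + 1)).takeWhile (fun x => x ≠ '\'')).length)).drop 1 := by
              rw [List.drop_drop]
            rw [h1, hdropj]; rfl
          rw [ih _ (by omega), htail]
          simp
        | nil =>
          rw [hd] at htd
          have hlen2 : ((cs.drop (i + 1)).takeWhile (fun x => x ≠ '\'')).length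
              = cs.length - (i + 1) := by
            have := congrArg List.length htd
            simp only [List.length_append, List.length_nil] at this
            omega
          have hjge : ¬ (i + 1 + ((cs.drop (i + 1)).takeWhile (fun x => x ≠ '\'')).length
              < cs.length) := by omega
          rw [if_neg hjge, tokALoop, dif_neg hjge]
          simp
      · by_cases hb : cs[i] = '\\' ∧ i + 1 < cs.length
        · rw [tokALoop, dif_pos h, if_neg hq, dif_pos hb]
          have hdrop2 : cs.drop (i + 1) = cs[i+1]'(hb.2) :: cs.drop (i + 2) :=
            List.drop_eq_getElem_cons hb.2
          rw [hdrop, hdrop2, tokBLoop]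
          simp only [if_neg hq, if_pos hb.1]
          rw [ih (i + 2) (by omega)]
        · rw [tokALoop, dif_pos h, if_neg hq, dif_neg hb]
          rw [hdrop, tokBLoop.eq_def]
          simp only [if_neg hq]
          by_cases hc : cs[i] = '\\'
          · -- lone final backslash: i+1 ≥ length
            have hend : ¬ (i + 1 < cs.length) := fun hlt => hb ⟨hc, hlt⟩
            have hnil : cs.drop (i + 1) = [] := List.drop_eq_nil_of_le (by omega)
            rw [if_pos hc, hnil]
            rw [ih (i + 1) (by omega), hnil, tokBLoop.eq_def]
          · rw [if_neg hc, ih (i + 1) (by omega)]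
    · rw [tokALoop, dif_neg h, List.drop_eq_nil_of_le (by omega), tokBLoop]

-- ===== VERDICT (by name: the statement is the Claim_ definition above) =====
theorem tokenize_postfix_spec : Claim_equal_tokenize_postfix := by
  intro s _
  unfold Spec_tokenize_postfix tokenize_postfix tokenize_postfix_alt
  rw [tokALoop_eq s.toList.length s.toList 0 (by omega)]
  rfl
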